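-- pv_equiv track=rewrite | github.com/ecoshub/tsp-new-organization | methods/assistant_algorithms.py | graph_search
-- ===== SOURCE A (Python) =====
-- def graph_search(graph):
--     leng = len(graph)
--     possible_routes = [[0, graph[0][i]] for i in range(len(graph[0]))]
--     for _ in range(leng - 2):
--         final = []
--         for i in range(len(possible_routes)):
--             after = possible_routes[i][-1]
--             curr = possible_routes[i]
--             temp = []
--             for j in range(len(graph[after])):
--                 if graph[after][j] not in curr:
--                     temp.append([*curr, graph[after][j]])
--             for j in range(len(temp)):
--                 final.append(temp[j])
--         possible_routes = final
--     return possible_routes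
-- ===== SOURCE B (Python) =====
-- def graph_search(graph):
--     steps0 = max(len(graph) - 2, 0)
--
--     def extend(route, steps):
--         if steps == 0:
--             return [route]
--         return [r for nbr in graph[route[-1]] if nbr not in route
--                   for r in extend(route + [nbr], steps - 1)]
--
--     return [r for v in graph[0] for r in extend([0, v], steps0)]
-- ===== Notes on version B (the rewrite author's own statement) =====
-- stated objective: alternative
-- what changed: Replaces the iterative level-by-level frontier rebuild (rebuilding the whole route list leng-2 times) with a recursive depth-first backtracking helper that extends each seed route to completion; depth-first enumeration yields the same lexicographic order as the BFS frontier.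
-- outside the precondition, e.g. on graph_search([[1], [0], [99]]): A returns [], B returns []
import Mathlib
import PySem

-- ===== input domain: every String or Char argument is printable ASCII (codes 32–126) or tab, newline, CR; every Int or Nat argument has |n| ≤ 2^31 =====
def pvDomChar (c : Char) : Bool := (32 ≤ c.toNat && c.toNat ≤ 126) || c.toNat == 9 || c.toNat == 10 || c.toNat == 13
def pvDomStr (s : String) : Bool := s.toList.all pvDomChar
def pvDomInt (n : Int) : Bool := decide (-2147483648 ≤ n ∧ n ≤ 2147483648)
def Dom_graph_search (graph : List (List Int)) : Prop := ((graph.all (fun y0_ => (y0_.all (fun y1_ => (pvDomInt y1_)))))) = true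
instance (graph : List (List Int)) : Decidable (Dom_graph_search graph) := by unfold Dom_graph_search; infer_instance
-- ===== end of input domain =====

-- B replaces A's iterative level-by-level frontier rebuild with recursive depth-first
-- backtracking (objective: alternative decomposition, same cost); return value only.

-- ===== PORT A =====
-- one pass of A's outer 'for _ in range(leng - 2)' body
def pvStepA (graph : List (List Int)) (routes : List (List Int)) : List (List Int) :=
  routes.foldl (fun final curr =>
    let after := PySem.List.pyGetD curr (-1) 0
    let row := PySem.List.pyGetD graph after []
    let temp := row.foldl (fun t v => if v ∈ curr then t else t ++ [curr ++ [v]]) []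
    temp.foldl (fun f r => f ++ [r]) final) []

def graph_search (graph : List (List Int)) : List (List Int) :=
  let leng := graph.length
  let seeds := (PySem.List.pyGetD graph 0 []).map (fun v => [0, v])
  (List.range (leng - 2)).foldl (fun pr _ => pvStepA graph pr) seeds

-- ===== PORT B =====
-- extend(route, steps): depth-first completion of one partial route
def pvExtend (graph : List (List Int)) : Nat → List Int → List (List Int)
  | 0, route => [route]
  | steps + 1, route =>
      ((PySem.List.pyGetD graph (PySem.List.pyGetD route (-1) 0) []).filter
          (fun nbr => nbr ∉ route)).flatMap
        (fun nbr => pvExtend graph steps (route ++ [nbr]))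

def graph_search_alt (graph : List (List Int)) : List (List Int) :=
  (PySem.List.pyGetD graph 0 []).flatMap (fun v => pvExtend graph (graph.length - 2) [0, v])

-- ===== PRECONDITION & SPEC =====
-- Pre_ excludes the empty graph (graph[0] raises IndexError) and, when the main loop can
-- actually run (3 ≤ len and a nonempty seed row graph[0]), graphs with an adjacency entry
-- outside Python's index range [-len, len), on which A raises IndexError if that entry is
-- reached as a route tail; this is slightly narrower than A's exact raising condition:
-- entries on dead branches are never indexed, so A still returns on some excluded graphs
-- (see cite).
def Pre_graph_search (graph : List (List Int)) : Prop :=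
  graph ≠ [] ∧ (3 ≤ graph.length → graph.getD 0 [] ≠ [] →
    ∀ row ∈ graph, ∀ v ∈ row, PySem.Raise.InRange graph.length v)
instance (graph : List (List Int)) : Decidable (Pre_graph_search graph) := by
  unfold Pre_graph_search; infer_instance

def pvWitness_graph_search : List (List Int) := [[1, 2], [0, 2], [1, 0]]

def Spec_graph_search (graph : List (List Int)) (out : List (List Int)) : Prop := out = graph_search_alt graph
instance (graph : List (List Int)) (out : List (List Int)) : Decidable (Spec_graph_search graph out) := by unfold Spec_graph_search; infer_instance

-- ===== CLAIM (what is proved, stated in full; the proofs are below) =====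
def Claim_equal_graph_search : Prop := ∀ (graph : List (List Int)), Dom_graph_search graph → Pre_graph_search graph → Spec_graph_search graph (graph_search graph)

-- ===== LEMMAS AND PROOFS =====

-- one BFS step is a flatMap of one-step extensions
-- the one-route extensions A's step attaches for a given route
def pvOneStep (graph : List (List Int)) (curr : List Int) : List (List Int) :=
  ((PySem.List.pyGetD graph (PySem.List.pyGetD curr (-1) 0) []).filter
      (fun v => decide (v ∉ curr))).map (fun v => curr ++ [v])

theorem pvStepA_foldl_eq (graph : List (List Int)) (routes : List (List Int))
    (acc : List (List Int)) :
    routes.foldl (fun final curr =>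
      let after := PySem.List.pyGetD curr (-1) 0
      let row := PySem.List.pyGetD graph after []
      let temp := row.foldl (fun t v => if v ∈ curr then t else t ++ [curr ++ [v]]) []
      temp.foldl (fun f r => f ++ [r]) final) acc
      = acc ++ routes.flatMap (pvOneStep graph) := by
  induction routes generalizing acc with
  | nil => simp
  | cons curr rest ih =>
      simp only [List.foldl_cons]
      rw [ih]
      have hinner : (PySem.List.pyGetD graph (PySem.List.pyGetD curr (-1) 0) []).foldl
          (fun t v => if v ∈ curr then t else t ++ [curr ++ [v]]) []
          = pvOneStep graph curr := by
        have := PySem.List.foldl_append_if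
          (p := fun v => decide (v ∉ curr))
          (f := fun v => curr ++ [v])
          (l := PySem.List.pyGetD graph (PySem.List.pyGetD curr (-1) 0) [])
          (acc := ([] : List (List Int)))
        simp only [List.nil_append] at this
        rw [pvOneStep, ← this]
        congr 1
        funext t v
        by_cases h : v ∈ curr <;> simp [h]
      simp only [hinner, PySem.List.foldl_append_singleton_eq_self,
        List.flatMap_cons, List.append_assoc]

theorem pvStepA_eq_flatMap (graph : List (List Int)) (routes : List (List Int)) :
    pvStepA graph routes = routes.flatMap (pvOneStep graph) := by
  unfold pvStepA
  rw [pvStepA_foldl_eq]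
  simp

theorem pvExtend_succ_eq (graph : List (List Int)) (n : Nat) (curr : List Int) :
    pvExtend graph (n + 1) curr = (pvOneStep graph curr).flatMap (pvExtend graph n) := by
  rw [pvExtend, pvOneStep, List.flatMap_map]

-- n BFS steps from any frontier = flatMap of n-step DFS extensions
theorem steps_eq_flatMap_extend (graph : List (List Int)) (n : Nat)
    (routes : List (List Int)) :
    (List.range n).foldl (fun pr _ => pvStepA graph pr) routes
      = routes.flatMap (pvExtend graph n) := by
  induction n generalizing routes with
  | zero => simp [pvExtend]
  | succ n ih =>
      rw [List.range_succ_eq_map]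
      simp only [List.foldl_cons]
      rw [List.foldl_map, ih (pvStepA graph routes), pvStepA_eq_flatMap,
        List.flatMap_assoc]
      congr 1
      funext curr
      rw [pvExtend_succ_eq]

theorem graph_search_eq_alt (graph : List (List Int)) :
    graph_search graph = graph_search_alt graph := by
  unfold graph_search graph_search_alt
  rw [steps_eq_flatMap_extend, List.flatMap_map]

-- ===== VERDICT (by name: the statement is the Claim_ definition above) =====
theorem graph_search_spec : Claim_equal_graph_search := by
  intro graph _ _
  unfold Spec_graph_search
  exact graph_search_eq_alt graph
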